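-- pv_equiv track=rewrite | github.com/cafrii/omega2 | 백준/Gold/21758. 꿀 따기/a21758.py | solve_slow2
-- ===== SOURCE A (Python) =====
-- def solve_slow2(N:int, A:list[int])->int:
--     '''
--     Args:
--     Returns:
--
--     벌통은 모든 위치를 다 시도하고,
--     벌의 위치를 선택적으로 함. 첫번째 벌은 무조건 맨 끝. 두번째 벌은 가능한 여러 곳 시도.
--     -> 여전히 시간 초과. N 5000 일 때 수 초 소요됨.
--
--     '''
--     # prefix sum 계산.
--     asum = [0]*(N+1)
--     # asum[k]는 A[0]부터 A[k-1]까지의 합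
--     for k in range(1, N+1): # k: 1 ~ N
--         asum[k] = asum[k-1] + A[k-1]
--
--     def psum(j:int, k:int):
--         # A[j] 부터 A[k] 까지의 부분 합. j, k는 A의 인덱스. (0 ~ N-1)
--         return asum[k+1] - asum[j]
--
--     maxval = -1
--
--     for b in range(N): # 벌통 위치. b: 0 ~ N-1
--         # case 1: 좌측 끝 A[0]이 첫번째 벌
--         if b > 0:
--             val0 = psum(1, b)
--             # 또 하나의 벌.
--             # case 1-1: 벌통 좌측의 모든 가능한 위치에 대해
--             for j in range(1, b): # j: 1 ~ b-1
--                 val = (val0 - A[j]) + psum(j+1, b)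
--                 # A[j]를 뺀 이유는 두번째 벌 위치의 꿀은 첫번째 벌이 딸 수 없기 때문
--                 # if val > maxval: log("b %d, 1, j %d -> %d", b, j, val)
--                 maxval = max(maxval, val)
--             # case 1-2: 두번째 벌이 우측 맨 끝 A[N-1]
--             if b < N-1:
--                 val = val0 + psum(b, N-2)  # 벌통 우측의 대부분
--                 maxval = max(maxval, val)
--
--         # case 2: 우측 끝 A[N-1]이 첫번째 벌
--         if b < N-1:
--             val0 = psum(b, N-2)
--             # case 2-1: 두번째 벌이 좌측 끝 A[0]
--             if 0 < b:
--                 val = val0 + psum(1, b) # 벌통 좌측의 대부분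
--                 maxval = max(maxval, val)
--             # case 2-2: 두번째 벌이 벌통(b)의 우측에.
--             for j in range(b+1, N-1): # j: b+1 ~ N-2
--                 val = val0 - A[j] + psum(b, j-1)
--
--                 # if val > maxval: log("b %d, 2, j %d -> %d", b, j, val)
--                 maxval = max(maxval, val)
--
--     return maxval
-- ===== SOURCE B (Python) =====
-- def solve_slow2(N:int, A:list[int])->int:
--     # prefix sums
--     asum = [0]*(N+1)
--     for k in range(1, N+1):
--         asum[k] = asum[k-1] + A[k-1]
--
--     maxval = -1
--
--     # both bees at the two ends, pot at b (1..N-2)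
--     for b in range(1, N-1):
--         maxval = max(maxval, asum[b+1] - asum[1] + asum[N-1] - asum[b])
--
--     # first bee at 0, second bee at j in 1..b-1, pot b: running prefix-min of A[j]+asum[j+1]
--     m = None
--     for b in range(2, N):
--         t = A[b-1] + asum[b]
--         m = t if m is None or t < m else m
--         maxval = max(maxval, 2*asum[b+1] - asum[1] - m)
--
--     # first bee at N-1, second bee at j in b+1..N-2, pot b: running suffix-max of asum[j]-A[j]
--     M = None
--     for b in range(N-3, -1, -1):
--         t = asum[b+1] - A[b+1]
--         M = t if M is None or t > M else M
--         maxval = max(maxval, asum[N-1] - 2*asum[b] + M)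
--
--     return maxval
-- ===== Notes on version B (the rewrite author's own statement) =====
-- stated objective: faster
-- what changed: A scans every second-bee position for every pot position (nested loops); B collapses the inner scans into one running prefix-min of A[j]+asum[j+1] and one running suffix-max of asum[j]-A[j], giving three linear passes over the prefix-sum array.
import Mathlib
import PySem

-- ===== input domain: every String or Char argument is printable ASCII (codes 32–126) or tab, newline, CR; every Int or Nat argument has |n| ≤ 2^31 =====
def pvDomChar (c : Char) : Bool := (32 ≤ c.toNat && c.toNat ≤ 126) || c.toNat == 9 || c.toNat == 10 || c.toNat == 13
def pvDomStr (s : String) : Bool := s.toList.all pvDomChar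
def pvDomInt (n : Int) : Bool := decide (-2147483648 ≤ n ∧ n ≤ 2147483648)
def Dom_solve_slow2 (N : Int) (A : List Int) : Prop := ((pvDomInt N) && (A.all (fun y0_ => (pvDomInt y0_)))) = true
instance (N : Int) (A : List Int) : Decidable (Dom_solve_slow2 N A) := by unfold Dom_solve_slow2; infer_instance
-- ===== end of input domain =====

-- B replaces A's O(N^2) nested scans over second-bee positions by three O(N) passes
-- (a running prefix-min of A[j]+asum[j+1] and a running suffix-max of asum[j]-A[j]);
-- measured faster (asymptotic).

-- ===== PORT A =====
-- shared helper: the prefix-sum list 'asum' ([0]*(N+1) then asum[k] = asum[k-1]+A[k-1]);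
-- both Pythons build it with this identical loop.
def pvAsum (N : Int) (A : List Int) : List Int :=
  (PySem.List.pyRange 1 (N+1) 1).foldl
    (fun asum k =>
      PySem.List.pySetD asum k (PySem.List.pyGetD asum (k-1) 0 + PySem.List.pyGetD A (k-1) 0))
    (List.replicate (N+1).toNat 0)

-- A's inner helper 'psum(j, k) = asum[k+1] - asum[j]'
def pvPsum (asum : List Int) (j k : Int) : Int :=
  PySem.List.pyGetD asum (k+1) 0 - PySem.List.pyGetD asum j 0

def solve_slow2 (N : Int) (A : List Int) : Int :=
  let asum := pvAsum N A
  (PySem.List.pyRange 0 N 1).foldl (fun maxval b =>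
    let maxval :=
      if b > 0 then
        let val0 := pvPsum asum 1 b
        let maxval := (PySem.List.pyRange 1 b 1).foldl
          (fun maxval j =>
            max maxval ((val0 - PySem.List.pyGetD A j 0) + pvPsum asum (j+1) b)) maxval
        if b < N - 1 then max maxval (val0 + pvPsum asum b (N-2)) else maxval
      else maxval
    if b < N - 1 then
      let val0 := pvPsum asum b (N-2)
      let maxval := if 0 < b then max maxval (val0 + pvPsum asum 1 b) else maxval
      (PySem.List.pyRange (b+1) (N-1) 1).foldl
        (fun maxval j =>
          max maxval (val0 - PySem.List.pyGetD A j 0 + pvPsum asum b (j-1))) maxval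
    else maxval) (-1)

-- ===== PORT B =====
def solve_slow2_alt (N : Int) (A : List Int) : Int :=
  let asum := pvAsum N A
  -- both bees at the two ends, pot at b
  let maxval :=
    (PySem.List.pyRange 1 (N-1) 1).foldl
      (fun maxval b =>
        max maxval (PySem.List.pyGetD asum (b+1) 0 - PySem.List.pyGetD asum 1 0
          + PySem.List.pyGetD asum (N-1) 0 - PySem.List.pyGetD asum b 0)) (-1)
  -- first bee at 0, running prefix-min m of A[j]+asum[j+1]
  let st :=
    (PySem.List.pyRange 2 N 1).foldl
      (fun (st : Int × Option Int) b =>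
        let t := PySem.List.pyGetD A (b-1) 0 + PySem.List.pyGetD asum b 0
        let m := match st.2 with
          | none => t
          | some m0 => if t < m0 then t else m0
        (max st.1 (2 * PySem.List.pyGetD asum (b+1) 0 - PySem.List.pyGetD asum 1 0 - m), some m))
      (maxval, none)
  -- first bee at N-1, running suffix-max M of asum[j]-A[j]
  let st2 :=
    (PySem.List.pyRange (N-3) (-1) (-1)).foldl
      (fun (st : Int × Option Int) b =>
        let t := PySem.List.pyGetD asum (b+1) 0 - PySem.List.pyGetD A (b+1) 0
        let M := match st.2 with
          | none => t
          | some M0 => if M0 < t then t else M0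
        (max st.1 (PySem.List.pyGetD asum (N-1) 0 - 2 * PySem.List.pyGetD asum b 0 + M), some M))
      (st.1, none)
  st2.1

-- ===== PRECONDITION & SPEC =====
-- Pre_ excludes exactly the inputs where Python A raises IndexError building asum (N ≥ 1 with fewer than N list entries).
def Pre_solve_slow2 (N : Int) (A : List Int) : Prop := N ≤ (A.length : Int) ∨ N ≤ 0
instance (N : Int) (A : List Int) : Decidable (Pre_solve_slow2 N A) := by unfold Pre_solve_slow2; infer_instance
def pvWitness_solve_slow2 : Int × List Int := (3, [1, 2, 3])

def Spec_solve_slow2 (N : Int) (A : List Int) (out : Int) : Prop := out = solve_slow2_alt N A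
instance (N : Int) (A : List Int) (out : Int) : Decidable (Spec_solve_slow2 N A out) := by unfold Spec_solve_slow2; infer_instance

-- ===== CLAIM (what is proved, stated in full; the proofs are below) =====
def Claim_equal_solve_slow2 : Prop := ∀ (N : Int) (A : List Int), Dom_solve_slow2 N A → Pre_solve_slow2 N A → Spec_solve_slow2 N A (solve_slow2 N A)

-- ===== LEMMAS AND PROOFS =====

-- big-max over a list, as the ports' running-max loops compute it
def bigmax (a : Int) (l : List Int) : Int := l.foldl max a

theorem bigmax_append (a : Int) (l1 l2 : List Int) :
    bigmax a (l1 ++ l2) = bigmax (bigmax a l1) l2 := List.foldl_append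

theorem le_bigmax_self (a : Int) (l : List Int) : a ≤ bigmax a l :=
  (PySem.List.le_foldl_max l a).1

theorem le_bigmax_of_mem {x : Int} {l : List Int} (a : Int) (h : x ∈ l) : x ≤ bigmax a l :=
  (PySem.List.le_foldl_max l a).2 x h

theorem bigmax_le_of {a c : Int} {l : List Int} (h0 : a ≤ c) (h : ∀ x ∈ l, x ≤ c) :
    bigmax a l ≤ c := by
  rcases PySem.List.foldl_max_mem l a with hm | hm
  · rw [bigmax, hm]; exact h0
  · exact h _ hm

theorem bigmax_eq_bigmax {a : Int} {l1 l2 : List Int}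
    (h1 : ∀ x ∈ l1, x ≤ bigmax a l2) (h2 : ∀ y ∈ l2, y ≤ bigmax a l1) :
    bigmax a l1 = bigmax a l2 :=
  le_antisymm (bigmax_le_of (le_bigmax_self a l2) h1) (bigmax_le_of (le_bigmax_self a l1) h2)

theorem foldl_max_map (l : List Int) (e : Int → Int) (a : Int) :
    l.foldl (fun mv x => max mv (e x)) a = bigmax a (l.map e) := by
  unfold bigmax; rw [List.foldl_map]

theorem foldl_bigmax_flatMap (l : List Int) (g : Int → List Int) (a : Int) :
    l.foldl (fun mv b => bigmax mv (g b)) a = bigmax a (l.flatMap g) := by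
  induction l generalizing a with
  | nil => rfl
  | cons x t ih => simp only [List.foldl_cons, List.flatMap_cons, bigmax_append]; exact ih _

-- the two second-bee "keys"
def kLf (A s : List Int) (j : Int) : Int :=
  PySem.List.pyGetD A j 0 + PySem.List.pyGetD s (j+1) 0
def kRf (A s : List Int) (j : Int) : Int :=
  PySem.List.pyGetD s j 0 - PySem.List.pyGetD A j 0

-- running prefix-min of kLf over j ∈ [1, n+1], in B's merge order/form
def KmL (A s : List Int) : Nat → Int
  | 0 => kLf A s 1
  | n+1 => if kLf A s ((n:Int)+2) < KmL A s n then kLf A s ((n:Int)+2) else KmL A s n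

-- running suffix-max of kRf over j ∈ [N-2-n, N-2], in B's merge order/form
def KmR (A s : List Int) (N : Int) : Nat → Int
  | 0 => kRf A s (N-2)
  | n+1 => if KmR A s N n < kRf A s (N-3-(n:Int)) then kRf A s (N-3-(n:Int)) else KmR A s N n

theorem KmL_le (A s : List Int) (n : Nat) :
    ∀ j : Int, 1 ≤ j → j ≤ 1 + (n:Int) → KmL A s n ≤ kLf A s j := by
  induction n with
  | zero =>
    intro j h1 h2
    have : j = 1 := by omega
    subst this; simp [KmL]
  | succ m ih =>
    intro j h1 h2
    rw [KmL]
    by_cases hj : j = (m:Int) + 2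
    · subst hj; split_ifs with h <;> omega
    · have := ih j h1 (by push_cast at h2 ⊢; omega)
      split_ifs with h <;> omega

theorem KmL_attained (A s : List Int) (n : Nat) :
    ∃ j : Int, 1 ≤ j ∧ j ≤ 1 + (n:Int) ∧ KmL A s n = kLf A s j := by
  induction n with
  | zero => exact ⟨1, by norm_num, by norm_num, rfl⟩
  | succ m ih =>
    obtain ⟨j, h1, h2, he⟩ := ih
    rw [KmL]
    split_ifs with h
    · exact ⟨(m:Int)+2, by omega, by push_cast; omega, rfl⟩
    · exact ⟨j, h1, by push_cast; omega, he⟩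

theorem KmR_le (A s : List Int) (N : Int) (n : Nat) :
    ∀ j : Int, N - 2 - (n:Int) ≤ j → j ≤ N - 2 → kRf A s j ≤ KmR A s N n := by
  induction n with
  | zero =>
    intro j h1 h2
    have : j = N - 2 := by omega
    subst this; simp [KmR]
  | succ m ih =>
    intro j h1 h2
    rw [KmR]
    by_cases hj : j = N - 3 - (m:Int)
    · subst hj; split_ifs with h <;> omega
    · have := ih j (by push_cast at h1 ⊢; omega) h2
      split_ifs with h <;> omega

theorem KmR_attained (A s : List Int) (N : Int) (n : Nat) :
    ∃ j : Int, N - 2 - (n:Int) ≤ j ∧ j ≤ N - 2 ∧ KmR A s N n = kRf A s j := by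
  induction n with
  | zero => exact ⟨N-2, by norm_num, by norm_num, rfl⟩
  | succ m ih =>
    obtain ⟨j, h1, h2, he⟩ := ih
    rw [KmR]
    split_ifs with h
    · exact ⟨N-3-(m:Int), by push_cast; omega, by omega, rfl⟩
    · exact ⟨j, by push_cast; omega, h2, he⟩

-- A's per-pot candidate lists (the port's own expressions)
def candsA (N : Int) (A s : List Int) (b : Int) : List Int :=
  (if b > 0 then
     (PySem.List.pyRange 1 b 1).map
       (fun j => (pvPsum s 1 b - PySem.List.pyGetD A j 0) + pvPsum s (j+1) b)
   else []) ++
  (if b > 0 ∧ b < N - 1 then [pvPsum s 1 b + pvPsum s b (N-2)] else []) ++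
  (if b < N - 1 ∧ 0 < b then [pvPsum s b (N-2) + pvPsum s 1 b] else []) ++
  (if b < N - 1 then
     (PySem.List.pyRange (b+1) (N-1) 1).map
       (fun j => pvPsum s b (N-2) - PySem.List.pyGetD A j 0 + pvPsum s b (j-1))
   else [])

def LA (N : Int) (A s : List Int) : List Int :=
  (PySem.List.pyRange 0 N 1).flatMap (candsA N A s)

-- B's per-pot reduced candidates
def eM (N : Int) (s : List Int) (b : Int) : Int :=
  PySem.List.pyGetD s (b+1) 0 - PySem.List.pyGetD s 1 0
    + PySem.List.pyGetD s (N-1) 0 - PySem.List.pyGetD s b 0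
def eL (A s : List Int) (b : Int) : Int :=
  2 * PySem.List.pyGetD s (b+1) 0 - PySem.List.pyGetD s 1 0 - KmL A s (b-2).toNat
def eR (N : Int) (A s : List Int) (b : Int) : Int :=
  PySem.List.pyGetD s (N-1) 0 - 2 * PySem.List.pyGetD s b 0 + KmR A s N (N-3-b).toNat

def LB (N : Int) (A s : List Int) : List Int :=
  (PySem.List.pyRange 1 (N-1) 1).map (eM N s) ++
  (PySem.List.pyRange 2 N 1).map (eL A s) ++
  (PySem.List.pyRange (N-3) (-1) (-1)).map (eR N A s)


-- proof-side names for the two ports' loop bodies (definitionally the ports' lambdas)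
def bodyA (N : Int) (A s : List Int) (maxval b : Int) : Int :=
  let maxval :=
    if b > 0 then
      let val0 := pvPsum s 1 b
      let maxval := (PySem.List.pyRange 1 b 1).foldl
        (fun maxval j =>
          max maxval ((val0 - PySem.List.pyGetD A j 0) + pvPsum s (j+1) b)) maxval
      if b < N - 1 then max maxval (val0 + pvPsum s b (N-2)) else maxval
    else maxval
  if b < N - 1 then
    let val0 := pvPsum s b (N-2)
    let maxval := if 0 < b then max maxval (val0 + pvPsum s 1 b) else maxval
    (PySem.List.pyRange (b+1) (N-1) 1).foldl
      (fun maxval j =>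
        max maxval (val0 - PySem.List.pyGetD A j 0 + pvPsum s b (j-1))) maxval
  else maxval

def stepL (A s : List Int) (st : Int × Option Int) (b : Int) : Int × Option Int :=
  let t := PySem.List.pyGetD A (b-1) 0 + PySem.List.pyGetD s b 0
  let m := match st.2 with
    | none => t
    | some m0 => if t < m0 then t else m0
  (max st.1 (2 * PySem.List.pyGetD s (b+1) 0 - PySem.List.pyGetD s 1 0 - m), some m)

def stepR (N : Int) (A s : List Int) (st : Int × Option Int) (b : Int) : Int × Option Int :=
  let t := PySem.List.pyGetD s (b+1) 0 - PySem.List.pyGetD A (b+1) 0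
  let M := match st.2 with
    | none => t
    | some M0 => if M0 < t then t else M0
  (max st.1 (PySem.List.pyGetD s (N-1) 0 - 2 * PySem.List.pyGetD s b 0 + M), some M)

theorem bigmax_nil (a : Int) : bigmax a [] = a := rfl
theorem bigmax_singleton (a x : Int) : bigmax a [x] = max a x := rfl
theorem bigmax_cons (a x : Int) (l : List Int) : bigmax a (x :: l) = bigmax (max a x) l := rfl

theorem bodyA_eq (N : Int) (A s : List Int) (mv b : Int) :
    bodyA N A s mv b = bigmax mv (candsA N A s b) := by
  unfold bodyA candsA
  by_cases h1 : b > 0 <;> by_cases h2 : b < N - 1 <;>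
    simp [h1, h2, foldl_max_map, bigmax_append, bigmax_cons, bigmax_nil, max_assoc]

theorem aEq (N : Int) (A : List Int) :
    solve_slow2 N A = bigmax (-1) (LA N A (pvAsum N A)) := by
  unfold LA
  rw [← foldl_bigmax_flatMap]
  have h0 : solve_slow2 N A
      = (PySem.List.pyRange 0 N 1).foldl (bodyA N A (pvAsum N A)) (-1) := rfl
  rw [h0]
  congr 1
  funext mv b
  exact bodyA_eq N A (pvAsum N A) mv b


theorem leftPass (A s : List Int) (n : Nat) (mv : Int) :
    (PySem.List.pyRange 2 (2+(n:Int)) 1).foldl (stepL A s) (mv, none) =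
      (bigmax mv ((PySem.List.pyRange 2 (2+(n:Int)) 1).map (eL A s)),
       match n with | 0 => none | Nat.succ m => some (KmL A s m)) := by
  induction n with
  | zero =>
    rw [PySem.List.pyRange_one_eq_nil (by norm_num)]
    rfl
  | succ m ih =>
    have hsplit : PySem.List.pyRange 2 (2+((m:Nat)+1:Nat):Int) 1
        = PySem.List.pyRange 2 (2+(m:Int)) 1 ++ [2+(m:Int)] := by
      rw [show ((2+((m:Nat)+1:Nat):Int)) = (2+(m:Int))+1 by push_cast; ring]
      exact PySem.List.pyRange_one_succ_right (by omega)
    rw [hsplit, List.foldl_append, List.map_append, ih]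
    cases m with
    | zero =>
      simp only [List.foldl_cons, List.foldl_nil, List.map_cons, List.map_nil, stepL]
      rw [bigmax_append, bigmax_singleton]
      unfold eL
      norm_num [KmL, kLf]
    | succ p =>
      simp only [List.foldl_cons, List.foldl_nil, List.map_cons, List.map_nil, stepL]
      rw [bigmax_append, bigmax_singleton]
      unfold eL
      rw [show ((2:Int) + ((p:Nat)+1:Nat) - 2).toNat = p+1 by push_cast; omega]
      rw [show KmL A s (p+1) = if kLf A s ((p:Int)+2) < KmL A s p
            then kLf A s ((p:Int)+2) else KmL A s p from rfl]
      unfold kLf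
      push_cast
      ring_nf

theorem pyRange_neg_one_succ_right (a b : Int) (h : b ≤ a) :
    PySem.List.pyRange a (b-1) (-1) = PySem.List.pyRange a b (-1) ++ [b] := by
  rw [PySem.List.pyRange_neg_one_eq_reverse, PySem.List.pyRange_neg_one_eq_reverse,
    show b - 1 + 1 = b by ring, PySem.List.pyRange_one_cons (by omega), List.reverse_cons]

theorem rightPass (N : Int) (A s : List Int) (n : Nat) (mv : Int) :
    (PySem.List.pyRange (N-3) (N-3-(n:Int)) (-1)).foldl (stepR N A s) (mv, none) =
      (bigmax mv ((PySem.List.pyRange (N-3) (N-3-(n:Int)) (-1)).map (eR N A s)),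
       match n with | 0 => none | Nat.succ m => some (KmR A s N m)) := by
  induction n with
  | zero =>
    rw [show N-3-((0:Nat):Int) = N-3 by push_cast; ring,
      PySem.List.pyRange_neg_one_eq_nil (by omega)]
    rfl
  | succ m ih =>
    have hsplit : PySem.List.pyRange (N-3) (N-3-((m:Nat)+1:Nat):Int) (-1)
        = PySem.List.pyRange (N-3) (N-3-(m:Int)) (-1) ++ [N-3-(m:Int)] := by
      rw [show (N-3-((m:Nat)+1:Nat):Int) = (N-3-(m:Int))-1 by push_cast; ring]
      exact pyRange_neg_one_succ_right _ _ (by omega)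
    rw [hsplit, List.foldl_append, List.map_append, ih]
    cases m with
    | zero =>
      simp only [List.foldl_cons, List.foldl_nil, List.map_cons, List.map_nil, stepR]
      rw [bigmax_append, bigmax_singleton]
      unfold eR
      push_cast
      rw [show N-3-(0:Int)+1 = N-2 by ring, show N-3-(0:Int) = N-3 by ring]
      norm_num [KmR, kRf]
    | succ p =>
      simp only [List.foldl_cons, List.foldl_nil, List.map_cons, List.map_nil, stepR]
      rw [bigmax_append, bigmax_singleton]
      unfold eR
      rw [show (N-3-(N-3-((p:Nat)+1:Nat):Int)).toNat = p+1 by push_cast; omega]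
      rw [show (N-3-((p:Nat)+1:Nat):Int)+1 = N-3-(p:Int) by push_cast; ring]
      rw [show KmR A s N (p+1) = if KmR A s N p < kRf A s (N-3-(p:Int))
            then kRf A s (N-3-(p:Int)) else KmR A s N p from rfl]
      unfold kRf
      push_cast
      ring_nf

theorem bEq (N : Int) (A : List Int) :
    solve_slow2_alt N A = bigmax (-1) (LB N A (pvAsum N A)) := by
  have h0 : solve_slow2_alt N A =
      ((PySem.List.pyRange (N-3) (-1) (-1)).foldl (stepR N A (pvAsum N A))
        (((PySem.List.pyRange 2 N 1).foldl (stepL A (pvAsum N A))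
          ((PySem.List.pyRange 1 (N-1) 1).foldl
            (fun maxval b => max maxval (PySem.List.pyGetD (pvAsum N A) (b+1) 0
              - PySem.List.pyGetD (pvAsum N A) 1 0
              + PySem.List.pyGetD (pvAsum N A) (N-1) 0
              - PySem.List.pyGetD (pvAsum N A) b 0)) (-1), none)).1, none)).1 := rfl
  rw [h0, foldl_max_map]
  have hfe : (fun b => PySem.List.pyGetD (pvAsum N A) (b+1) 0
      - PySem.List.pyGetD (pvAsum N A) 1 0
      + PySem.List.pyGetD (pvAsum N A) (N-1) 0
      - PySem.List.pyGetD (pvAsum N A) b 0) = eM N (pvAsum N A) := rfl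
  rw [hfe]
  by_cases hN : 2 ≤ N
  · have hL := leftPass A (pvAsum N A) (N-2).toNat
      (bigmax (-1) ((PySem.List.pyRange 1 (N-1) 1).map (eM N (pvAsum N A))))
    rw [show (2:Int) + (((N-2).toNat:Nat) : Int) = N by omega] at hL
    rw [hL]
    have hR := rightPass N A (pvAsum N A) (N-2).toNat
      (bigmax (bigmax (-1) ((PySem.List.pyRange 1 (N-1) 1).map (eM N (pvAsum N A))))
        ((PySem.List.pyRange 2 N 1).map (eL A (pvAsum N A))))
    rw [show N - 3 - (((N-2).toNat:Nat) : Int) = -1 by omega] at hR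
    rw [hR]
    simp [LB, bigmax_append]
  · rw [PySem.List.pyRange_one_eq_nil (show N ≤ 2 by omega),
      PySem.List.pyRange_one_eq_nil (show (N-1:Int) ≤ 1 by omega),
      PySem.List.pyRange_neg_one_eq_nil (show (N-3:Int) ≤ -1 by omega)]
    simp [LB, PySem.List.pyRange_one_eq_nil (show N ≤ 2 by omega),
      PySem.List.pyRange_one_eq_nil (show (N-1:Int) ≤ 1 by omega),
      PySem.List.pyRange_neg_one_eq_nil (show (N-3:Int) ≤ -1 by omega), bigmax]

theorem la_le (N : Int) (A : List Int) :
    ∀ x ∈ LA N A (pvAsum N A), x ≤ bigmax (-1) (LB N A (pvAsum N A)) := by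
  intro x hx
  obtain ⟨b, hb, hxb⟩ := List.mem_flatMap.1 hx
  rw [PySem.List.mem_pyRange_one] at hb
  unfold candsA at hxb
  simp only [List.mem_append, List.mem_ite_nil_right, List.mem_singleton, List.mem_map,
    PySem.List.mem_pyRange_one] at hxb
  rcases hxb with ((⟨hb0, j, hj, rfl⟩ | ⟨hc, rfl⟩) | ⟨hc, rfl⟩) | ⟨hbN, j, hj, rfl⟩
  · -- case 1-1 : second bee strictly between the left end and the pot
    have hcast : (((b-2).toNat : Nat) : Int) = b - 2 := Int.toNat_of_nonneg (by omega)
    have hK := KmL_le A (pvAsum N A) (b-2).toNat j hj.1 (by rw [hcast]; omega)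
    unfold kLf at hK
    have hle : (pvPsum (pvAsum N A) 1 b - PySem.List.pyGetD A j 0)
        + pvPsum (pvAsum N A) (j+1) b ≤ eL A (pvAsum N A) b := by
      unfold pvPsum eL; linarith
    refine le_trans hle (le_bigmax_of_mem _ ?_)
    unfold LB
    refine List.mem_append.2 (Or.inl (List.mem_append.2 (Or.inr ?_)))
    exact List.mem_map_of_mem (by rw [PySem.List.mem_pyRange_one]; omega)
  · -- case 1-2 : second bee at the right end
    have he : pvPsum (pvAsum N A) 1 b + pvPsum (pvAsum N A) b (N-2)
        = eM N (pvAsum N A) b := by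
      unfold pvPsum eM; rw [show N-2+1 = N-1 by ring]; ring
    rw [he]
    refine le_bigmax_of_mem _ ?_
    unfold LB
    refine List.mem_append.2 (Or.inl (List.mem_append.2 (Or.inl ?_)))
    exact List.mem_map_of_mem (by rw [PySem.List.mem_pyRange_one]; omega)
  · -- case 2-1 : same pair of bees as case 1-2
    have he : pvPsum (pvAsum N A) b (N-2) + pvPsum (pvAsum N A) 1 b
        = eM N (pvAsum N A) b := by
      unfold pvPsum eM; rw [show N-2+1 = N-1 by ring]; ring
    rw [he]
    refine le_bigmax_of_mem _ ?_
    unfold LB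
    refine List.mem_append.2 (Or.inl (List.mem_append.2 (Or.inl ?_)))
    exact List.mem_map_of_mem (by rw [PySem.List.mem_pyRange_one]; omega)
  · -- case 2-2 : second bee strictly between the pot and the right end
    have hcast : (((N-3-b).toNat : Nat) : Int) = N - 3 - b := Int.toNat_of_nonneg (by omega)
    have hK := KmR_le A (pvAsum N A) N (N-3-b).toNat j (by rw [hcast]; omega) (by omega)
    unfold kRf at hK
    have hle : pvPsum (pvAsum N A) b (N-2) - PySem.List.pyGetD A j 0
        + pvPsum (pvAsum N A) b (j-1) ≤ eR N A (pvAsum N A) b := by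
      unfold pvPsum eR
      rw [show j-1+1 = j by ring, show N-2+1 = N-1 by ring]
      linarith
    refine le_trans hle (le_bigmax_of_mem _ ?_)
    unfold LB
    refine List.mem_append.2 (Or.inr ?_)
    exact List.mem_map_of_mem (by rw [PySem.List.mem_pyRange_neg_one]; omega)

theorem lb_le (N : Int) (A : List Int) :
    ∀ y ∈ LB N A (pvAsum N A), y ≤ bigmax (-1) (LA N A (pvAsum N A)) := by
  intro y hy
  unfold LB at hy
  simp only [List.mem_append, List.mem_map, PySem.List.mem_pyRange_one,
    PySem.List.mem_pyRange_neg_one] at hy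
  rcases hy with (⟨b, hb, rfl⟩ | ⟨b, hb, rfl⟩) | ⟨b, hb, rfl⟩
  · -- middle list: equals A's case 1-2 candidate at pot b
    have he : eM N (pvAsum N A) b
        = pvPsum (pvAsum N A) 1 b + pvPsum (pvAsum N A) b (N-2) := by
      unfold pvPsum eM; rw [show N-2+1 = N-1 by ring]; ring
    rw [he]
    refine le_bigmax_of_mem _ (List.mem_flatMap.2 ⟨b, ?_, ?_⟩)
    · rw [PySem.List.mem_pyRange_one]; omega
    · unfold candsA
      refine List.mem_append.2 (Or.inl (List.mem_append.2 (Or.inl (List.mem_append.2 (Or.inr ?_)))))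
      rw [List.mem_ite_nil_right]
      exact ⟨⟨by omega, by omega⟩, List.mem_singleton_self _⟩
  · -- left list: the prefix-min is attained at some second-bee position j
    obtain ⟨j, hj1, hj2, hKeq⟩ := KmL_attained A (pvAsum N A) (b-2).toNat
    rw [Int.toNat_of_nonneg (by omega : (0:Int) ≤ b - 2)] at hj2
    have he : eL A (pvAsum N A) b
        = (pvPsum (pvAsum N A) 1 b - PySem.List.pyGetD A j 0)
            + pvPsum (pvAsum N A) (j+1) b := by
      unfold eL at *
      rw [hKeq]
      unfold kLf pvPsum
      ring
    rw [he]
    refine le_bigmax_of_mem _ (List.mem_flatMap.2 ⟨b, ?_, ?_⟩)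
    · rw [PySem.List.mem_pyRange_one]; omega
    · unfold candsA
      refine List.mem_append.2 (Or.inl (List.mem_append.2 (Or.inl (List.mem_append.2 (Or.inl ?_)))))
      rw [List.mem_ite_nil_right]
      refine ⟨by omega, List.mem_map_of_mem ?_⟩
      rw [PySem.List.mem_pyRange_one]; omega
  · -- right list: the suffix-max is attained at some second-bee position j
    obtain ⟨j, hj1, hj2, hKeq⟩ := KmR_attained A (pvAsum N A) N (N-3-b).toNat
    rw [Int.toNat_of_nonneg (by omega : (0:Int) ≤ N - 3 - b)] at hj1
    have he : eR N A (pvAsum N A) b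
        = pvPsum (pvAsum N A) b (N-2) - PySem.List.pyGetD A j 0
            + pvPsum (pvAsum N A) b (j-1) := by
      unfold eR at *
      rw [hKeq]
      unfold kRf pvPsum
      rw [show j-1+1 = j by ring, show N-2+1 = N-1 by ring]
      ring
    rw [he]
    refine le_bigmax_of_mem _ (List.mem_flatMap.2 ⟨b, ?_, ?_⟩)
    · rw [PySem.List.mem_pyRange_one]; omega
    · unfold candsA
      refine List.mem_append.2 (Or.inr ?_)
      rw [List.mem_ite_nil_right]
      refine ⟨by omega, List.mem_map_of_mem ?_⟩
      rw [PySem.List.mem_pyRange_one]; omega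

theorem solve_slow2_main (N : Int) (A : List Int) : solve_slow2 N A = solve_slow2_alt N A := by
  rw [aEq, bEq]
  exact bigmax_eq_bigmax (la_le N A) (lb_le N A)

-- ===== VERDICT (by name: the statement is the Claim_ definition above) =====
theorem solve_slow2_spec : Claim_equal_solve_slow2 := by
  intro N A _ _
  unfold Spec_solve_slow2
  exact solve_slow2_main N A
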